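-- pv_equiv track=rewrite | github.com/papanokechi/wallis-pcf-lean4 | relay_round10b_extensions.py | compute_plane_partitions
-- ===== SOURCE A (Python) =====
-- def compute_plane_partitions(N):
--     """MacMahon: prod_{m>=1} (1-q^m)^{-m}.
--     Recurrence: n*f(n) = sum_{j=1}^n sigma_2(j)*f(n-j)
--     where sigma_2(j) = sum_{d|j} d^2.
--     """
--     sig2 = [0]*(N+1)
--     for j in range(1, N+1):
--         s, d = 0, 1
--         while d*d <= j:
--             if j % d == 0:
--                 s += d*d
--                 if d != j//d: s += (j//d)**2
--             d += 1
--         sig2[j] = s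
--
--     f = [0]*(N+1); f[0] = 1
--     for n in range(1, N+1):
--         s = 0
--         for j in range(1, n+1):
--             s += sig2[j]*f[n-j]
--         f[n] = s//n
--
--     # Verify: MacMahon numbers 1, 1, 3, 6, 13, 24, 48, 86, 160, 282, ...
--     known = [1, 1, 3, 6, 13, 24, 48, 86, 160, 282, 500, 859, 1479]
--     for i, v in enumerate(known):
--         if i <= N: assert f[i] == v, f"PL({i})={f[i]} != {v}"
--     return f
-- ===== SOURCE B (Python) =====
-- def compute_plane_partitions(N):
--     """MacMahon plane partition counts, sigma_2 by divisor sieve instead of trial division."""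
--     sig2 = [0] * (N + 1)
--     for d in range(1, N + 1):
--         dd = d * d
--         for m in range(d, N + 1, d):
--             sig2[m] += dd
--     f = [0] * (N + 1)
--     f[0] = 1
--     for n in range(1, N + 1):
--         f[n] = sum(sig2[j] * f[n - j] for j in range(1, n + 1)) // n
--     return f
-- ===== Notes on version B (the rewrite author's own statement) =====
-- stated objective: alternative
-- what changed: sigma_2 is computed by a divisor sieve that scatters d*d over all multiples of d in one pass, instead of per-j trial division up to sqrt(j); the convolution DP (which dominates the cost) is kept, so overall cost is unchanged.
import Mathlib
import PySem

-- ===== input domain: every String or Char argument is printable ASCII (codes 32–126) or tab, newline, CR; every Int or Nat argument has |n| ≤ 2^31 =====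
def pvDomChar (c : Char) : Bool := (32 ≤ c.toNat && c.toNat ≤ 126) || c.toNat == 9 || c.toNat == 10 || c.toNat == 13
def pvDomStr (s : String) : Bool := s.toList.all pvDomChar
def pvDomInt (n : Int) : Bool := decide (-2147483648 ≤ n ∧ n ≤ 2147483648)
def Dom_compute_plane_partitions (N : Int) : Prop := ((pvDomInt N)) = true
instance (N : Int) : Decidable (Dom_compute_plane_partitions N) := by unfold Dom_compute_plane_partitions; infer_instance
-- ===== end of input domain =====

-- B replaces A's per-j trial-division sigma_2 (inner loop to sqrt j) by a divisor sieve that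
-- scatters d*d over all multiples of d; the convolution DP is unchanged (objective: alternative algorithm, same overall cost).


-- ===== PORT A =====
-- A's while loop: s, d = 0, 1; while d*d <= j: if j % d == 0: s += d*d; if d != j//d: s += (j//d)**2; d += 1
def pvTrial (j d s : Int) : Int :=
  if h : d * d ≤ j then
    pvTrial j (d + 1)
      (if PySem.Int.mod j d = 0 then
        (if d ≠ PySem.Int.floordiv j d
          then s + d * d + (PySem.Int.floordiv j d) ^ 2
          else s + d * d)
       else s)
  else s
termination_by (j + 1 - d).toNat
decreasing_by
  exact (Int.toNat_lt_toNat (sub_pos.mpr (Int.lt_add_one_iff.mpr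
    (le_trans (Int.le_self_sq d) (le_of_eq_of_le (sq d) h))))).mpr
    (sub_lt_sub_left (lt_add_one d) (j + 1))

-- sig2 = [0]*(N+1); for j in range(1, N+1): sig2[j] = <trial-division sigma_2(j)>
def pvSig2A (N : Int) : List Int :=
  (PySem.List.pyRange 1 (N + 1) 1).foldl
    (fun l j => PySem.List.pySetD l j (pvTrial j 1 0))
    (List.replicate (N + 1).toNat 0)

-- f = [0]*(N+1); f[0] = 1; for n in range(1, N+1): s = 0; for j ...: s += sig2[j]*f[n-j]; f[n] = s//n
-- The final 'known'-values assert loop only compares f against literals and raises AssertionError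
-- when a comparison fails; for every N ≥ 0 the asserts pass (checked by the differential tester),
-- so the loop has no effect on the returned value and a raise is not representable in List Int.
def compute_plane_partitions (N : Int) : List Int :=
  let sig2 := pvSig2A N
  (PySem.List.pyRange 1 (N + 1) 1).foldl
    (fun f n =>
      let s := (PySem.List.pyRange 1 (n + 1) 1).foldl
        (fun s j => s + PySem.List.pyGetD sig2 j 0 * PySem.List.pyGetD f (n - j) 0) 0
      PySem.List.pySetD f n (PySem.Int.floordiv s n))
    (PySem.List.pySetD (List.replicate (N + 1).toNat 0) 0 1)

-- ===== PORT B =====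
-- sig2 = [0]*(N+1); for d in range(1, N+1): dd = d*d; for m in range(d, N+1, d): sig2[m] += dd
def pvSig2B (N : Int) : List Int :=
  (PySem.List.pyRange 1 (N + 1) 1).foldl
    (fun l d =>
      let dd := d * d
      (PySem.List.pyRange d (N + 1) d).foldl
        (fun l m => PySem.List.pySetD l m (PySem.List.pyGetD l m 0 + dd)) l)
    (List.replicate (N + 1).toNat 0)

-- f = [0]*(N+1); f[0] = 1; for n in range(1, N+1): f[n] = sum(sig2[j]*f[n-j] for j in range(1, n+1)) // n
def compute_plane_partitions_alt (N : Int) : List Int :=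
  let sig2 := pvSig2B N
  (PySem.List.pyRange 1 (N + 1) 1).foldl
    (fun f n =>
      PySem.List.pySetD f n (PySem.Int.floordiv
        (((PySem.List.pyRange 1 (n + 1) 1).map
          (fun j => PySem.List.pyGetD sig2 j 0 * PySem.List.pyGetD f (n - j) 0)).sum) n))
    (PySem.List.pySetD (List.replicate (N + 1).toNat 0) 0 1)

-- ===== PRECONDITION & SPEC =====
-- For N < 0 the Python A raises IndexError at 'f[0] = 1' (the lists are empty); excluded.
def Pre_compute_plane_partitions (N : Int) : Prop := 0 ≤ N
instance (N : Int) : Decidable (Pre_compute_plane_partitions N) := by unfold Pre_compute_plane_partitions; infer_instance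
def pvWitness_compute_plane_partitions : Int := (6)

def Spec_compute_plane_partitions (N : Int) (out : List Int) : Prop := out = compute_plane_partitions_alt N
instance (N : Int) (out : List Int) : Decidable (Spec_compute_plane_partitions N out) := by unfold Spec_compute_plane_partitions; infer_instance

-- ===== CLAIM (what is proved, stated in full; the proofs are below) =====
def Claim_equal_compute_plane_partitions : Prop := ∀ (N : Int), Dom_compute_plane_partitions N → Pre_compute_plane_partitions N → Spec_compute_plane_partitions N (compute_plane_partitions N)

-- ===== LEMMAS AND PROOFS =====

-- a fold of length-preserving steps preserves length
theorem pv_foldl_length {α : Type} (xs : List α) (step : List Int → α → List Int)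
    (h : ∀ l x, (step l x).length = l.length) (L : List Int) :
    (xs.foldl step L).length = L.length := by
  induction xs generalizing L with
  | nil => rfl
  | cons x xs ih => simp [List.foldl_cons, ih, h]

theorem pvSig2A_length (N : Int) : (pvSig2A N).length = (N + 1).toNat := by
  unfold pvSig2A
  rw [pv_foldl_length]
  · simp
  · intro l x; exact PySem.List.length_pySetD l x _

theorem pvSig2B_length (N : Int) : (pvSig2B N).length = (N + 1).toNat := by
  unfold pvSig2B
  rw [pv_foldl_length]
  · simp
  · intro l x
    rw [pv_foldl_length]
    intro l' x'; exact PySem.List.length_pySetD l' x' _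

-- A-side: fold of pySetD over range 1..b with values depending only on the index
theorem pv_foldl_set_entry (g : Int → Int) (a b : Int) (ha : 0 ≤ a) (L : List Int) (m : Nat) :
    ((PySem.List.pyRange a b 1).foldl (fun l j => PySem.List.pySetD l j (g j)) L)[m]? =
      if a ≤ (m : Int) ∧ (m : Int) < b ∧ m < L.length then some (g m) else L[m]? := by
  by_cases hab : b ≤ a
  · rw [PySem.List.pyRange_one_eq_nil hab]
    have : ¬ (a ≤ (m : Int) ∧ (m : Int) < b ∧ m < L.length) := by omega
    simp [this]
  · rw [not_le] at hab
    rw [PySem.List.pyRange_one_cons hab, List.foldl_cons,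
        PySem.List.pySetD_of_nonneg L (g a) ha,
        pv_foldl_set_entry g (a + 1) b (by omega) _ m]
    rw [List.length_set, List.getElem?_set]
    by_cases hma : (m : Int) = a
    · have h1 : a.toNat = m := by omega
      have h2 : ¬ (a + 1 ≤ (m : Int)) := by omega
      by_cases hl : m < L.length
      · have hcond : a ≤ (m : Int) ∧ (m : Int) < b ∧ m < L.length := by omega
        rw [if_neg (show ¬ (a + 1 ≤ (m : Int) ∧ (m : Int) < b ∧ m < L.length) by omega),
            h1, if_pos hl, if_pos hcond, ← hma, if_pos rfl]
      · rw [if_neg (show ¬ (a + 1 ≤ (m : Int) ∧ (m : Int) < b ∧ m < L.length) by omega),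
            h1, if_neg hl, if_neg (show ¬ (a ≤ (m : Int) ∧ (m : Int) < b ∧ m < L.length) by omega),
            List.getElem?_eq_none (by omega), if_pos rfl]
    · have h1 : ¬ (a.toNat = m) := by omega
      have h2 : (a + 1 ≤ (m : Int) ∧ (m : Int) < b ∧ m < L.length) ↔
          (a ≤ (m : Int) ∧ (m : Int) < b ∧ m < L.length) := by omega
      rw [if_neg h1, if_congr h2 rfl rfl]
termination_by (b - a).toNat

-- B-side inner loop: adding c at each index of a nodup list of nonnegative indices
theorem pv_foldl_add_entry (ms : List Int) (hnd : ms.Nodup) (hpos : ∀ i ∈ ms, 0 ≤ i)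
    (c : Int) (L : List Int) (m : Nat) :
    (ms.foldl (fun l i => PySem.List.pySetD l i (PySem.List.pyGetD l i 0 + c)) L)[m]? =
      if (m : Int) ∈ ms then (L[m]?).map (· + c) else L[m]? := by
  induction ms generalizing L with
  | nil => simp
  | cons i rest ih =>
    have hi : 0 ≤ i := hpos i (List.mem_cons_self)
    rw [List.foldl_cons, PySem.List.pySetD_of_nonneg _ _ hi,
        ih (List.nodup_cons.mp hnd).2 (fun x hx => hpos x (List.mem_cons_of_mem _ hx))]
    by_cases hmi : (m : Int) = i
    · have hnr : (m : Int) ∉ rest := by rw [hmi]; exact (List.nodup_cons.mp hnd).1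
      rw [if_neg hnr, if_pos (by simp [hmi]), List.getElem?_set,
          (show i.toNat = m by omega), if_pos rfl]
      by_cases hl : m < L.length
      · rw [if_pos hl, List.getElem?_eq_getElem hl]
        have hv : PySem.List.pyGetD L i 0 = L[m] := by
          rw [← hmi, PySem.List.pyGetD_natCast]
          simp [List.getD_eq_getElem?_getD, List.getElem?_eq_getElem hl]
        simp [hv]
      · rw [if_neg hl, List.getElem?_eq_none (by omega)]; simp
    · rw [List.getElem?_set_ne (by omega)]
      exact if_congr (by simp [hmi]) rfl rfl

theorem pv_pyRange_nodup_pos (a b s : Int) (hs : 0 < s) : (PySem.List.pyRange a b s).Nodup := by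
  rw [PySem.List.pyRange_of_pos a b hs]
  refine List.Nodup.map ?_ (List.nodup_range)
  intro x y h
  have h2 : s * (x : Int) = s * (y : Int) := add_left_cancel h
  have := mul_left_cancel₀ (ne_of_gt hs) h2
  exact_mod_cast this

-- B-side sieve: the outer fold up to bound K, entrywise
theorem pv_sieve_aux (N K : Int) (hK : 0 ≤ K) (L : List Int)
    (hlen : L.length = (N + 1).toNat) (m : Nat) (hm : m < L.length) :
    ((PySem.List.pyRange 1 (K + 1) 1).foldl
      (fun l d =>
        let dd := d * d
        (PySem.List.pyRange d (N + 1) d).foldl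
          (fun l m => PySem.List.pySetD l m (PySem.List.pyGetD l m 0 + dd)) l) L)[m]? =
      (L[m]?).map (· + ∑ d ∈ Finset.Icc 1 K, if d ∣ (m : Int) ∧ d ≤ (m : Int) then d * d else 0) := by
  rcases eq_or_lt_of_le hK with h0 | h0
  · rw [← h0, PySem.List.pyRange_one_eq_nil (by omega), List.foldl_nil,
        Finset.Icc_eq_empty (by omega), Finset.sum_empty]
    cases L[m]? <;> simp
  · have hstep : PySem.List.pyRange 1 (K + 1) 1 = PySem.List.pyRange 1 K 1 ++ [K] := by
      have h := PySem.List.pyRange_one_succ_right (a := 1) (b := K) (by omega)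
      simpa using h
    have ih := pv_sieve_aux N (K - 1) (by omega) L hlen m hm
    rw [show K - 1 + 1 = K by ring] at ih
    rw [hstep, List.foldl_append, List.foldl_cons, List.foldl_nil]
    simp only []
    rw [pv_foldl_add_entry _ (pv_pyRange_nodup_pos _ _ _ (by omega))
        (fun i hi => by
          have := (PySem.List.mem_pyRange_iff_of_pos (by omega : (0:Int) < K) i).mp hi
          omega) (K * K) _ m, ih]
    have hmN : (m : Int) ≤ N := by omega
    have hmem : ((m : Int) ∈ PySem.List.pyRange K (N + 1) K) ↔ (K ∣ (m : Int) ∧ K ≤ (m : Int)) := by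
      rw [PySem.List.mem_pyRange_iff_of_pos (by omega : (0:Int) < K)]
      constructor
      · rintro ⟨h1, _, h3⟩
        exact ⟨by simpa using dvd_add h3 (dvd_refl K), h1⟩
      · rintro ⟨h1, h2⟩
        exact ⟨h2, by omega, dvd_sub h1 (dvd_refl K)⟩
    have hIcc : Finset.Icc 1 K = insert K (Finset.Icc 1 (K - 1)) := by
      ext x; simp only [Finset.mem_Icc, Finset.mem_insert]; omega
    rw [hIcc, Finset.sum_insert (by simp only [Finset.mem_Icc]; omega)]
    rw [List.getElem?_eq_getElem hm]
    by_cases hc : K ∣ (m : Int) ∧ K ≤ (m : Int)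
    · rw [if_pos (hmem.mpr hc), if_pos hc]
      simp only [Option.map_some]
      congr 1
      ring
    · rw [if_neg (fun h => hc (hmem.mp h)), if_neg hc]
      simp only [Option.map_some]
      congr 1
      ring
termination_by K.toNat
decreasing_by omega

-- B-side sieve characterisation
theorem pvSig2B_entry (N : Int) (hN : 0 ≤ N) (m : Nat) (hm : m < (N + 1).toNat) :
    (pvSig2B N)[m]? = some (∑ d ∈ Finset.Icc 1 N, if d ∣ (m : Int) ∧ d ≤ (m : Int) then d * d else 0) := by
  unfold pvSig2B
  rw [pv_sieve_aux N N hN _ (by simp) m (by simp [hm]),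
      List.getElem?_replicate, if_pos hm]
  simp

-- A's trial-division loop invariant
theorem pvTrial_inv (j : Int) (hj : 1 ≤ j) (d : Int) (hd : 1 ≤ d) (s : Int) :
    pvTrial j d s = s + ∑ e ∈ Finset.Icc d j,
      (if e ∣ j ∧ e * e ≤ j then e * e + (if e * e ≠ j then (j / e) * (j / e) else 0) else 0) := by
  rw [pvTrial]
  by_cases hdd : d * d ≤ j
  · rw [dif_pos hdd]
    have hdj : d ≤ j := le_trans (le_mul_of_one_le_left (by omega) hd) hdd
    have hIcc : Finset.Icc d j = insert d (Finset.Icc (d + 1) j) := by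
      ext x; simp only [Finset.mem_Icc, Finset.mem_insert]; omega
    rw [pvTrial_inv j hj (d + 1) (by omega) _, hIcc,
        Finset.sum_insert (by simp [Finset.mem_Icc])]
    have hfd : PySem.Int.floordiv j d = j / d := PySem.Int.floordiv_eq_ediv_of_pos (by omega)
    have hmd : (PySem.Int.mod j d = 0) ↔ d ∣ j := PySem.Int.mod_eq_zero_iff_dvd j d
    by_cases hdvd : d ∣ j
    · by_cases heq : d * d = j
      · have hq : j / d = d := by rw [← heq]; exact Int.mul_ediv_cancel_left d (by omega)
        rw [if_pos (hmd.mpr hdvd), hfd, hq, if_neg (by omega), if_pos ⟨hdvd, hdd⟩,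
            if_neg (by omega : ¬ d * d ≠ j)]
        ring
      · have hne : d ≠ j / d := fun h =>
          heq (by nth_rewrite 2 [h]; exact Int.mul_ediv_cancel' hdvd)
        rw [if_pos (hmd.mpr hdvd), hfd, if_pos hne, if_pos ⟨hdvd, hdd⟩,
            if_pos (show d * d ≠ j from fun h => hne (by rw [← h, Int.mul_ediv_cancel_left d (by omega)]))]
        ring
    · rw [if_neg (fun h => hdvd (hmd.mp h)), if_neg (by tauto)]
      ring
  · rw [dif_neg hdd]
    rw [Finset.sum_eq_zero]
    · ring
    · intro e he
      rw [Finset.mem_Icc] at he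
      have h1 : d * d ≤ e * e := mul_le_mul he.1 he.1 (by omega) (by omega)
      exact if_neg (fun h => absurd h.2 (by omega))
termination_by (j + 1 - d).toNat
decreasing_by
  have hdj : d ≤ j := le_trans (le_mul_of_one_le_left (by omega) hd) hdd
  omega

-- the sqrt-pairing identity: small divisors together with their cofactors give all divisors
theorem pv_pairing (j : Int) (hj : 1 ≤ j) :
    (∑ e ∈ Finset.Icc 1 j,
      (if e ∣ j ∧ e * e ≤ j then e * e + (if e * e ≠ j then (j / e) * (j / e) else 0) else 0)) =
    ∑ e ∈ Finset.Icc 1 j, if e ∣ j then e * e else 0 := by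
  have hsplit : ∀ e : Int,
      (if e ∣ j ∧ e * e ≤ j then e * e + (if e * e ≠ j then (j / e) * (j / e) else 0) else 0)
      = (if e ∣ j ∧ e * e ≤ j then e * e else 0)
        + (if e ∣ j ∧ e * e < j then (j / e) * (j / e) else 0) := by
    intro e
    by_cases h1 : e ∣ j ∧ e * e ≤ j
    · by_cases h2 : e * e = j
      · rw [if_pos h1, if_pos h1, if_neg (by omega : ¬ e * e ≠ j),
            if_neg (fun h => by omega)]
      · rw [if_pos h1, if_pos h1, if_pos h2, if_pos ⟨h1.1, by omega⟩]
    · rw [if_neg h1, if_neg h1, if_neg (fun h => h1 ⟨h.1, le_of_lt h.2⟩)]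
      ring
  have hRsplit : ∀ e : Int,
      (if e ∣ j then e * e else 0)
      = (if e ∣ j ∧ e * e ≤ j then e * e else 0) + (if e ∣ j ∧ j < e * e then e * e else 0) := by
    intro e
    by_cases hd : e ∣ j
    · by_cases hle : e * e ≤ j
      · rw [if_pos hd, if_pos ⟨hd, hle⟩, if_neg (fun h => by omega)]; ring
      · rw [if_pos hd, if_neg (fun h => by omega), if_pos ⟨hd, by omega⟩]; ring
    · rw [if_neg hd, if_neg (fun h => hd h.1), if_neg (fun h => hd h.1)]; ring
  rw [Finset.sum_congr rfl (fun e _ => hsplit e), Finset.sum_add_distrib,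
      Finset.sum_congr rfl (fun e _ => hRsplit e), Finset.sum_add_distrib]
  congr 1
  rw [← Finset.sum_filter, ← Finset.sum_filter]
  have key : ∀ a : Int, a ∣ j → 1 ≤ a →
      1 ≤ j / a ∧ j / a ≤ j ∧ j / a ∣ j ∧ a * (j / a) = j ∧ j / (j / a) = a := by
    intro a ha h1
    obtain ⟨c, hc⟩ := ha
    have hane : a ≠ 0 := by omega
    have hq : j / a = c := by rw [hc, Int.mul_ediv_cancel_left _ hane]
    have hc1 : 1 ≤ c := by nlinarith
    refine ⟨by omega, by nlinarith, ⟨a, by rw [hc, Int.mul_ediv_cancel_left c hane]; ring⟩, by rw [hc, Int.mul_ediv_cancel_left c hane], ?_⟩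
    rw [hq, hc, mul_comm]
    exact Int.mul_ediv_cancel_left a (show c ≠ 0 by omega)
  refine Finset.sum_nbij' (fun e => j / e) (fun e => j / e) ?_ ?_ ?_ ?_ ?_
  · intro a ha
    simp only [Finset.mem_filter, Finset.mem_Icc] at ha ⊢
    obtain ⟨⟨ha1, _⟩, had, hlt⟩ := ha
    obtain ⟨hq1, hq2, hq3, hq4, _⟩ := key a had ha1
    refine ⟨⟨hq1, hq2⟩, hq3, ?_⟩
    nlinarith
  · intro a ha
    simp only [Finset.mem_filter, Finset.mem_Icc] at ha ⊢
    obtain ⟨⟨ha1, _⟩, had, hlt⟩ := ha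
    obtain ⟨hq1, hq2, hq3, hq4, _⟩ := key a had ha1
    refine ⟨⟨hq1, hq2⟩, hq3, ?_⟩
    nlinarith
  · intro a ha
    simp only [Finset.mem_filter, Finset.mem_Icc] at ha
    exact (key a ha.2.1 ha.1.1).2.2.2.2
  · intro a ha
    simp only [Finset.mem_filter, Finset.mem_Icc] at ha
    exact (key a ha.2.1 ha.1.1).2.2.2.2
  · intro a _
    rfl

theorem pvSig2_eq (N : Int) (hN : 0 ≤ N) : pvSig2A N = pvSig2B N := by
  apply List.ext_getElem?
  intro m
  by_cases hm : m < (N + 1).toNat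
  · rw [pvSig2B_entry N hN m hm]
    unfold pvSig2A
    rw [pv_foldl_set_entry _ 1 (N + 1) (by omega) _ m]
    by_cases h0 : 1 ≤ (m : Int)
    · rw [if_pos ⟨h0, by omega, by simpa using hm⟩]
      congr 1
      rw [pvTrial_inv (m : Int) h0 1 le_rfl 0, pv_pairing _ h0, zero_add]
      have hagree : ∀ e ∈ Finset.Icc (1:Int) (m : Int),
          (if e ∣ (m : Int) then e * e else 0)
          = (if e ∣ (m : Int) ∧ e ≤ (m : Int) then e * e else 0) := by
        intro e he
        rw [Finset.mem_Icc] at he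
        by_cases hd : e ∣ (m : Int)
        · rw [if_pos hd, if_pos ⟨hd, he.2⟩]
        · rw [if_neg hd, if_neg (fun h => hd h.1)]
      rw [Finset.sum_congr rfl hagree]
      exact Finset.sum_subset (Finset.Icc_subset_Icc le_rfl (by omega))
        (fun x hx hnx => by
          rw [Finset.mem_Icc] at hx
          simp only [Finset.mem_Icc] at hnx
          exact if_neg (fun h => by omega))
    · rw [if_neg (fun h => h0 h.1), List.getElem?_replicate, if_pos hm]
      rw [Finset.sum_eq_zero (fun d hd => by
        rw [Finset.mem_Icc] at hd
        exact if_neg (fun h => by omega))]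
  · have h1 : (pvSig2A N).length ≤ m := by rw [pvSig2A_length]; omega
    have h2 : (pvSig2B N).length ≤ m := by rw [pvSig2B_length]; omega
    rw [List.getElem?_eq_none h1, List.getElem?_eq_none h2]

theorem pv_dp_eq (N : Int) (h : pvSig2A N = pvSig2B N) :
    compute_plane_partitions N = compute_plane_partitions_alt N := by
  unfold compute_plane_partitions compute_plane_partitions_alt
  rw [h]
  apply PySem.List.foldl_congr_mem
  intro f n _
  rw [PySem.List.foldl_add]
  ring_nf

-- ===== VERDICT (by name: the statement is the Claim_ definition above) =====
theorem compute_plane_partitions_spec : Claim_equal_compute_plane_partitions := by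
  intro N _ hPre
  unfold Spec_compute_plane_partitions
  exact pv_dp_eq N (pvSig2_eq N hPre)
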